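-- pv_equiv track=rewrite | github.com/ThisLimn0/OpenWilly | tools/willy_re/willy_re/lingo/listparser.py | _get_property_name
-- ===== SOURCE A (Python) =====
-- class LingoListParserError(Exception):
--     pass
--
-- def _get_property_name(s: str) -> str:
--     """Extract the key from a property entry like #key:value."""
--     name = ""
--     for ch in s:
--         if ch == "#":
--             continue
--         if ch == ":":
--             break
--         name += ch
--     if not name:
--         raise LingoListParserError(f"Invalid property name in: {s}")
--     return name
-- ===== SOURCE B (Python) =====
-- class LingoListParserError(Exception):
--     pass
--
-- def _get_property_name(s: str) -> str:
--     """Extract the key from a property entry like #key:value."""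
--     head = s.split(':', 1)[0]
--     name = head.replace('#', '')
--     if not name:
--         raise LingoListParserError(f"Invalid property name in: {s}")
--     return name
-- ===== Notes on version B (the rewrite author's own statement) =====
-- stated objective: simpler
-- what changed: Replaces A's single character-by-character loop (skip '#', break at ':', accumulate with string +=) with two separate library passes: split(':', 1)[0] to take the pre-colon segment, then replace('#', '') to drop hashes.
-- outside the precondition, e.g. on _get_property_name('#:value'): A raises LingoListParserError, B raises LingoListParserError; on _get_property_name('#'): A raises LingoListParserError, B raises LingoListParserError; on _get_property_name(':x'): A raises LingoListParserError, B raises LingoListParserError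
import Mathlib
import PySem

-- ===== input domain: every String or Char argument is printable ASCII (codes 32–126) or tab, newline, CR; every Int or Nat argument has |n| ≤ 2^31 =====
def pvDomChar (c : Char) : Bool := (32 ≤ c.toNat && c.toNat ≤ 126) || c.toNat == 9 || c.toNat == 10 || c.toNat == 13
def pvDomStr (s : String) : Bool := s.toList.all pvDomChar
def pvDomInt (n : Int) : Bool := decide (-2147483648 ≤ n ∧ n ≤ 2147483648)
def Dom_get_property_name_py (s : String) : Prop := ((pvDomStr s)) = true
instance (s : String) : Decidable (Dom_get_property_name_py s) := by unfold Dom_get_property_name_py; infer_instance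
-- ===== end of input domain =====

-- B replaces A's single interleaved character loop by two library passes (split at the first ':', then drop '#'); objective: simpler.

-- ===== PORT A =====
-- the for-loop with `continue`/`break` and the string accumulator `name`
def getPropNameGoA : List Char → String → String
  | [], name => name
  | c :: rest, name =>
      if c = '#' then getPropNameGoA rest name
      else if c = ':' then name
      else getPropNameGoA rest (name.push c)

def get_property_name_py (s : String) : String :=
  getPropNameGoA s.toList ""
  -- (on inputs where the loop yields "", Python A raises LingoListParserError; excluded by Pre_)

-- ===== PORT B =====
def get_property_name_py_alt (s : String) : String :=
  let head := ((PySem.Str.splitMax? s ":" 1).getD []).headD ""   -- s.split(':', 1)[0]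
  PySem.Str.replace head "#" ""                                   -- head.replace('#', '')
  -- (when the result is "", Python B raises LingoListParserError; excluded by Pre_)

-- ===== PRECONDITION & SPEC =====
-- Pre_ excludes exactly the inputs on which A raises LingoListParserError: those whose
-- pre-colon segment contains no character other than '#' (B raises there too).
def Pre_get_property_name_py (s : String) : Prop :=
  (s.toList.takeWhile (fun c => c ≠ ':')).filter (fun c => c ≠ '#') ≠ []
instance (s : String) : Decidable (Pre_get_property_name_py s) := by unfold Pre_get_property_name_py; infer_instance

def pvWitness_get_property_name_py : String := "#key:value"

def Spec_get_property_name_py (s : String) (out : String) : Prop := out = get_property_name_py_alt s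
instance (s : String) (out : String) : Decidable (Spec_get_property_name_py s out) := by unfold Spec_get_property_name_py; infer_instance

-- ===== CLAIM (what is proved, stated in full; the proofs are below) =====
def Claim_equal_get_property_name_py : Prop := ∀ (s : String), Dom_get_property_name_py s → Pre_get_property_name_py s → Spec_get_property_name_py s (get_property_name_py s)

-- ===== LEMMAS AND PROOFS =====

-- A's loop builds name ++ (hash-free pre-colon characters)
theorem goA_eq (l : List Char) (name : String) :
    (getPropNameGoA l name).toList
      = name.toList ++ (l.takeWhile (fun c => c ≠ ':')).filter (fun c => c ≠ '#') := by
  induction l generalizing name with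
  | nil => simp [getPropNameGoA]
  | cons c rest ih =>
      by_cases h1 : c = '#'
      · subst h1; simp [getPropNameGoA, ih]
      · by_cases h2 : c = ':'
        · subst h2; simp [getPropNameGoA, h1]
        · simp [getPropNameGoA, h1, h2, ih, String.toList_push]

-- replace.go with a one-char old and empty new filters that char out (given enough fuel)
theorem replace_go_hash (l : List Char) (fuel : Nat) (acc : List Char) (h : l.length ≤ fuel) :
    PySem.Chars.replace.go ['#'] [] fuel l acc
      = acc.reverse ++ l.filter (fun c => c ≠ '#') := by
  induction l generalizing fuel acc with
  | nil => cases fuel <;> simp [PySem.Chars.replace.go]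
  | cons c rest ih =>
      cases fuel with
      | zero => simp at h
      | succ n =>
          simp only [List.length_cons, Nat.succ_le_succ_iff] at h
          by_cases hc : c = '#'
          · subst hc
            simp [PySem.Chars.replace.go, List.isPrefixOf, ih n acc h]
          · have : (['#'].isPrefixOf (c :: rest)) = false := by
              simp [List.isPrefixOf]; exact fun h' => (hc h'.symm).elim
            simp [PySem.Chars.replace.go, this, ih n (c :: acc) h, hc]

theorem replace_hash (l : List Char) :
    PySem.Chars.replace l ['#'] [] = l.filter (fun c => c ≠ '#') := by
  simp [PySem.Chars.replace, replace_go_hash l l.length [] le_rfl]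

-- splitOnMax.go with maxsplit 0 returns its acc (reversed) first
theorem split_go_zero (fuel : Nat) (l cur : List Char) (p : List Char) :
    (PySem.Chars.splitOnMax.go [':'] fuel 0 l cur [p]).headD [] = p := by
  cases fuel <;> cases l <;> simp [PySem.Chars.splitOnMax.go]

-- the first piece of split(':', 1) is the pre-colon segment
theorem split_go_head (l : List Char) (fuel : Nat) (cur : List Char) (h : l.length ≤ fuel) :
    (PySem.Chars.splitOnMax.go [':'] fuel 1 l cur []).headD []
      = cur.reverse ++ l.takeWhile (fun c => c ≠ ':') := by
  induction l generalizing fuel cur with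
  | nil => cases fuel <;> simp [PySem.Chars.splitOnMax.go]
  | cons c rest ih =>
      cases fuel with
      | zero => simp at h
      | succ n =>
          simp only [List.length_cons, Nat.succ_le_succ_iff] at h
          by_cases hc : c = ':'
          · subst hc
            have := split_go_zero n rest [] cur.reverse
            simp only [List.headD] at this ⊢
            simp [PySem.Chars.splitOnMax.go, List.isPrefixOf, this]
          · have hpre : ([':'].isPrefixOf (c :: rest)) = false := by
              simp [List.isPrefixOf]; exact fun h' => (hc h'.symm).elim
            have := ih n (c :: cur) h
            simp only [List.headD] at this ⊢
            simp [PySem.Chars.splitOnMax.go, hpre, this, hc]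

theorem alt_eq (s : String) :
    get_property_name_py_alt s
      = String.ofList ((s.toList.takeWhile (fun c => c ≠ ':')).filter (fun c => c ≠ '#')) := by
  unfold get_property_name_py_alt
  have h1 : PySem.Str.splitMax? s ":" 1
      = some ((PySem.Chars.splitOnMax s.toList [':'] 1).map String.ofList) := by
    simp [PySem.Str.splitMax?, PySem.Chars.splitMax?]
  rw [h1]
  have h2 : (PySem.Chars.splitOnMax s.toList [':'] 1).headD []
      = s.toList.takeWhile (fun c => c ≠ ':') := by
    simpa using split_go_head s.toList (s.toList.length + 1) []
      (Nat.le_succ _)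
  have h3 : ((PySem.Chars.splitOnMax s.toList [':'] 1).map String.ofList).headD ""
      = String.ofList ((PySem.Chars.splitOnMax s.toList [':'] 1).headD []) := by
    cases PySem.Chars.splitOnMax s.toList [':'] 1 <;> simp
  simp only [Option.getD_some, h3, h2]
  simp [PySem.Str.replace, replace_hash, String.toList_ofList]

-- ===== VERDICT (by name: the statement is the Claim_ definition above) =====
theorem get_property_name_py_spec : Claim_equal_get_property_name_py := by
  intro s _ _
  unfold Spec_get_property_name_py get_property_name_py
  rw [alt_eq, ← String.toList_inj, goA_eq, String.toList_ofList]
  simp
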